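-- pv_equiv track=rewrite | github.com/arkb0/Scripts | Utils/Differ/differ.py | char_diff
-- ===== SOURCE A (Python) =====
-- from typing import List, Tuple, Optional
--
-- RESET: str = '\033[0m'   # Reset colour back to terminal default
--
-- RED: str = '\033[31m'    # Red for deletions
--
-- GREEN: str = '\033[32m'  # Green for additions
--
-- def colour_text(text: str, colour: str) -> str:
--   return f'{colour}{text}{RESET}'   # Wraps text in ANSI codes for display
--
-- def char_diff(line1: str, line2: str) -> Tuple[str, str]:
--   result1: List[str] = []
--   result2: List[str] = []         # Buffers for old and new line renderings
--   # The longer of the two lines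
--   max_len: int = max(len(line1), len(line2))
--
--   # for each character
--   for i in range(max_len):
--     c1: Optional[str] = line1[i] if i < len(line1) else None   # Character from old line
--     c2: Optional[str] = line2[i] if i < len(line2) else None   # Character from new line
--
--     # Identical
--     if c1 == c2:
--       # Append both
--       if c1 is not None:
--         result1.append(c1)          # Keep unchanged character
--         result2.append(c2)
--     # Different
--     else:
--       # Existed
--       if c1 is not None:
--         # Removed
--         result1.append(colour_text(c1, RED))    # Highlight removal
--       # Now exists
--       if c2 is not None:
--         # Added
--         result2.append(colour_text(c2, GREEN))  # Highlight addition
--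
--   return ''.join(result1), ''.join(result2)     # Return coloured strings
-- ===== SOURCE B (Python) =====
-- from typing import Tuple
--
-- RESET: str = '\033[0m'
-- RED: str = '\033[31m'
-- GREEN: str = '\033[32m'
--
-- def colour_text(text: str, colour: str) -> str:
--     return f'{colour}{text}{RESET}'
--
-- def _render(src: str, other: str, colour: str) -> str:
--     # keep a character iff the other line has the same character at that index
--     return ''.join(c if i < len(other) and other[i] == c else colour_text(c, colour)
--                    for i, c in enumerate(src))
--
-- def char_diff(line1: str, line2: str) -> Tuple[str, str]:
--     return _render(line1, line2, RED), _render(line2, line1, GREEN)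
-- ===== Notes on version B (the rewrite author's own statement) =====
-- stated objective: simpler
-- what changed: Replaces A's single parallel index loop with Optional sentinels building both buffers at once by two independent per-side renderings: one shared helper walks one string and keeps or colours each character by looking up the other string at that index.
import Mathlib
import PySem

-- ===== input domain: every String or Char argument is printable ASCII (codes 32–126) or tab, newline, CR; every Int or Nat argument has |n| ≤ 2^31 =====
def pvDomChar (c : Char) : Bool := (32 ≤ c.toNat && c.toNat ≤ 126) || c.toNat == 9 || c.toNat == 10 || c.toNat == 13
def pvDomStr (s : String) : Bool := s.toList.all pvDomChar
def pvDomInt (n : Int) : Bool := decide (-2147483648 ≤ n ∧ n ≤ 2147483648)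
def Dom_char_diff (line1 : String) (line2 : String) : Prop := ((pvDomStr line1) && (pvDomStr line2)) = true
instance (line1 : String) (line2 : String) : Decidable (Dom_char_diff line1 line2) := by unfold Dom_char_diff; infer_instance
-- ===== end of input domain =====

-- B replaces A's single parallel index loop with sentinels by two independent per-side
-- renderings through one shared helper (objective: simpler).

def pvRESET : String := "\x1b[0m"
def pvRED : String := "\x1b[31m"
def pvGREEN : String := "\x1b[32m"

def colour_text (text : String) (colour : String) : String := colour ++ text ++ pvRESET

-- ===== PORT A =====
-- loop body of A's 'for i in range(max_len)'
def charDiffStepA (l1 l2 : List Char) (acc : List String × List String) (i : Nat) :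
    List String × List String :=
  let c1 : Option Char := l1[i]?
  let c2 : Option Char := l2[i]?
  if c1 == c2 then
    match c1, c2 with
    | some a, some b => (acc.1 ++ [String.singleton a], acc.2 ++ [String.singleton b])
    | _, _ => acc
  else
    let r1 := match c1 with
      | some a => acc.1 ++ [colour_text (String.singleton a) pvRED]
      | none => acc.1
    let r2 := match c2 with
      | some b => acc.2 ++ [colour_text (String.singleton b) pvGREEN]
      | none => acc.2
    (r1, r2)

def char_diff (line1 : String) (line2 : String) : String × String :=
  let l1 := line1.toList
  let l2 := line2.toList
  let maxLen := max l1.length l2.length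
  let r := (List.range maxLen).foldl (charDiffStepA l1 l2) ([], [])
  (String.join r.1, String.join r.2)

-- ===== PORT B =====
-- B's '_render': ''.join over enumerate(src), keep a char iff other has it at the same index
def renderSide (src other : List Char) (colour : String) : String :=
  String.join ((PySem.List.enumerate src).map (fun p =>
    if decide (p.1 < (other.length : Int)) && (PySem.List.pyGet? other p.1 == some p.2) then
      String.singleton p.2
    else
      colour_text (String.singleton p.2) colour))

def char_diff_alt (line1 : String) (line2 : String) : String × String :=
  (renderSide line1.toList line2.toList pvRED,
   renderSide line2.toList line1.toList pvGREEN)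

-- ===== PRECONDITION & SPEC =====
def Spec_char_diff (line1 : String) (line2 : String) (out : String × String) : Prop := out = char_diff_alt line1 line2
instance (line1 : String) (line2 : String) (out : String × String) : Decidable (Spec_char_diff line1 line2 out) := by unfold Spec_char_diff; infer_instance

-- ===== CLAIM (what is proved, stated in full; the proofs are below) =====
def Claim_equal_char_diff : Prop := ∀ (line1 : String) (line2 : String), Dom_char_diff line1 line2 → Spec_char_diff line1 line2 (char_diff line1 line2)

-- ===== LEMMAS AND PROOFS =====

-- reference diff: per-position coloured fragments for both sides
def pvDiffs : List Char → List Char → List String × List String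
  | [], [] => ([], [])
  | [], c2 :: t2 =>
    let p := pvDiffs [] t2
    (p.1, colour_text (String.singleton c2) pvGREEN :: p.2)
  | c1 :: t1, [] =>
    let p := pvDiffs t1 []
    (colour_text (String.singleton c1) pvRED :: p.1, p.2)
  | c1 :: t1, c2 :: t2 =>
    let p := pvDiffs t1 t2
    if c1 == c2 then
      (String.singleton c1 :: p.1, String.singleton c2 :: p.2)
    else
      (colour_text (String.singleton c1) pvRED :: p.1,
       colour_text (String.singleton c2) pvGREEN :: p.2)

theorem stepA_succ (l1 l2 : List Char) (acc : List String × List String) (i : Nat) :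
    charDiffStepA l1 l2 acc (i + 1) = charDiffStepA l1.tail l2.tail acc i := by
  cases l1 <;> cases l2 <;> simp [charDiffStepA]

theorem loopA (l1 l2 : List Char) (acc : List String × List String) :
    (List.range (max l1.length l2.length)).foldl (charDiffStepA l1 l2) acc
      = (acc.1 ++ (pvDiffs l1 l2).1, acc.2 ++ (pvDiffs l1 l2).2) := by
  induction l1 generalizing l2 acc with
  | nil =>
    induction l2 generalizing acc with
    | nil => simp [pvDiffs]
    | cons c2 t2 ih =>
      have h : max (List.length ([] : List Char)) (c2 :: t2).length
          = max (List.length ([] : List Char)) t2.length + 1 := by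
        simp
      rw [h, List.range_succ_eq_map, List.foldl_cons, List.foldl_map]
      have hfun : (fun (a : List String × List String) (i : Nat) =>
          charDiffStepA [] (c2 :: t2) a (i + 1)) = charDiffStepA [] t2 := by
        funext a i
        exact stepA_succ [] (c2 :: t2) a i
      rw [hfun, ih]
      simp [charDiffStepA, pvDiffs]
  | cons c1 t1 ih =>
    cases l2 with
    | nil =>
      have h : max (c1 :: t1).length (List.length ([] : List Char))
          = max t1.length (List.length ([] : List Char)) + 1 := by
        simp
      rw [h, List.range_succ_eq_map, List.foldl_cons, List.foldl_map]
      have hfun : (fun (a : List String × List String) (i : Nat) =>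
          charDiffStepA (c1 :: t1) [] a (i + 1)) = charDiffStepA t1 [] := by
        funext a i
        exact stepA_succ (c1 :: t1) [] a i
      rw [hfun, ih]
      simp [charDiffStepA, pvDiffs]
    | cons c2 t2 =>
      have h : max (c1 :: t1).length (c2 :: t2).length
          = max t1.length t2.length + 1 := by
        simp [Nat.succ_max_succ]
      rw [h, List.range_succ_eq_map, List.foldl_cons, List.foldl_map]
      have hfun : (fun (a : List String × List String) (i : Nat) =>
          charDiffStepA (c1 :: t1) (c2 :: t2) a (i + 1)) = charDiffStepA t1 t2 := by
        funext a i
        exact stepA_succ (c1 :: t1) (c2 :: t2) a i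
      rw [hfun, ih]
      by_cases hc : c1 = c2
      · subst hc; simp [charDiffStepA, pvDiffs]
      · have hbe : (c1 == c2) = false := by simp [hc]
        simp [charDiffStepA, pvDiffs, hbe]

-- shifting the enumerate start renumbers the indices
theorem enumerate_shift (xs : List Char) (s : Int) :
    PySem.List.enumerate xs (s + 1)
      = (PySem.List.enumerate xs s).map (fun p => (p.1 + 1, p.2)) := by
  induction xs generalizing s with
  | nil => simp [PySem.List.enumerate_nil]
  | cons x t ih => simp [PySem.List.enumerate_cons, ih]

theorem foldl_append_init (l : List String) (a b : String) :
    List.foldl (fun r s => r ++ s) (a ++ b) l = a ++ List.foldl (fun r s => r ++ s) b l := by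
  induction l generalizing b with
  | nil => simp
  | cons x t ih => simp only [List.foldl_cons, String.append_assoc, ih]

theorem join_cons (s : String) (l : List String) :
    String.join (s :: l) = s ++ String.join l := by
  show List.foldl (fun r t => r ++ t) ("" ++ s) l = s ++ List.foldl (fun r t => r ++ t) "" l
  rw [show ("" ++ s) = (s ++ "") by simp, foldl_append_init]

-- peel one character off both src and other in renderSide
theorem renderSide_cons_cons (c1 c2 : Char) (t1 t2 : List Char) (colour : String) :
    renderSide (c1 :: t1) (c2 :: t2) colour
      = (if c2 == c1 then String.singleton c1
         else colour_text (String.singleton c1) colour) ++ renderSide t1 t2 colour := by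
  unfold renderSide
  rw [PySem.List.enumerate_cons, enumerate_shift, List.map_cons, List.map_map, join_cons]
  have hcongr : List.map
      ((fun p : Int × Char =>
        if decide (p.1 < ((c2 :: t2).length : Int)) && (PySem.List.pyGet? (c2 :: t2) p.1 == some p.2) then
          String.singleton p.2
        else colour_text (String.singleton p.2) colour) ∘ fun p : Int × Char => (p.1 + 1, p.2))
      (PySem.List.enumerate t1)
      = List.map
      (fun p : Int × Char =>
        if decide (p.1 < (t2.length : Int)) && (PySem.List.pyGet? t2 p.1 == some p.2) then
          String.singleton p.2
        else colour_text (String.singleton p.2) colour)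
      (PySem.List.enumerate t1) := by
    apply List.map_congr_left
    intro p hp
    rcases (PySem.List.mem_enumerate_iff t1 0 p).1 hp with ⟨k, hk, hpk⟩
    subst hpk
    simp only [Function.comp]
    have h1 : PySem.List.pyGet? (c2 :: t2) ((0 : Int) + (k : Int) + 1) = t2[k]? := by
      have he : ((0 : Int) + (k : Int) + 1) = ((k + 1 : Nat) : Int) := by push_cast; ring
      rw [he, PySem.List.pyGet?_natCast]
      simp
    have h2 : PySem.List.pyGet? t2 ((0 : Int) + (k : Int)) = t2[k]? := by
      have he : ((0 : Int) + (k : Int)) = ((k : Nat) : Int) := by ring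
      rw [he, PySem.List.pyGet?_natCast]
    rw [h1, h2]
    have h3 : ((0 : Int) + (k : Int) + 1 < ((c2 :: t2).length : Int))
        ↔ ((0 : Int) + (k : Int) < (t2.length : Int)) := by
      simp only [List.length_cons]
      push_cast
      omega
    simp only [decide_eq_decide.mpr h3]
  rw [hcongr]
  have hget0 : PySem.List.pyGet? (c2 :: t2) (0 : Int) = some c2 := by
    have h := PySem.List.pyGet?_natCast (c2 :: t2) (0 : Nat)
    rw [Int.natCast_zero] at h
    rw [h]
    rfl
  have hlen : decide ((0 : Int) < ((c2 :: t2).length : Int)) = true := by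
    simp only [List.length_cons]
    simp
  simp only [hget0, hlen, Bool.true_and]
  by_cases h : c2 = c1 <;> simp [h]

-- src exhausted: nothing to render
theorem renderSide_nil (other : List Char) (colour : String) :
    renderSide [] other colour = "" := by
  simp [renderSide, PySem.List.enumerate_nil, String.join]

-- other exhausted: every remaining src char is coloured
theorem renderSide_nil_other (src : List Char) (colour : String) :
    renderSide src [] colour
      = String.join (src.map (fun c => colour_text (String.singleton c) colour)) := by
  unfold renderSide
  congr 1
  have hcongr : List.map
      (fun p : Int × Char =>
        if decide (p.1 < ((List.length ([] : List Char)) : Int)) && (PySem.List.pyGet? ([] : List Char) p.1 == some p.2) then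
          String.singleton p.2
        else colour_text (String.singleton p.2) colour)
      (PySem.List.enumerate src)
      = List.map (fun p : Int × Char => colour_text (String.singleton p.2) colour)
        (PySem.List.enumerate src) := by
    apply List.map_congr_left
    intro p hp
    have hnone : PySem.List.pyGet? ([] : List Char) p.1 = none := by
      simp [PySem.List.pyGet?, PySem.List.pyIdx?]
    simp [hnone]
  rw [hcongr,
    show (fun p : Int × Char => colour_text (String.singleton p.2) colour)
      = ((fun c => colour_text (String.singleton c) colour) ∘ Prod.snd) from rfl,
    ← List.map_map, PySem.List.map_snd_enumerate]

-- A's overhang when line2 is exhausted: all red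
theorem diffs_nil_right (l1 : List Char) :
    pvDiffs l1 [] = (l1.map (fun ch => colour_text (String.singleton ch) pvRED), []) := by
  induction l1 with
  | nil => simp [pvDiffs]
  | cons c t ih => simp [pvDiffs, ih]

-- A's overhang when line1 is exhausted: all green
theorem diffs_nil_left (l2 : List Char) :
    pvDiffs [] l2 = ([], l2.map (fun ch => colour_text (String.singleton ch) pvGREEN)) := by
  induction l2 with
  | nil => simp [pvDiffs]
  | cons c t ih => simp [pvDiffs, ih]

theorem renderSide_red (l1 l2 : List Char) :
    renderSide l1 l2 pvRED = String.join (pvDiffs l1 l2).1 := by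
  induction l1 generalizing l2 with
  | nil =>
    rw [renderSide_nil, diffs_nil_left]
    simp [String.join]
  | cons c1 t1 ih =>
    cases l2 with
    | nil => rw [renderSide_nil_other, diffs_nil_right]
    | cons c2 t2 =>
      rw [renderSide_cons_cons, ih]
      by_cases h : c1 = c2
      · subst h; simp [pvDiffs, join_cons]
      · have h1 : (c2 == c1) = false := by simp [Ne.symm h]
        have h2 : (c1 == c2) = false := by simp [h]
        simp [pvDiffs, h1, h2, join_cons]

theorem renderSide_green (l1 l2 : List Char) :
    renderSide l2 l1 pvGREEN = String.join (pvDiffs l1 l2).2 := by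
  induction l2 generalizing l1 with
  | nil =>
    rw [renderSide_nil, diffs_nil_right]
    simp [String.join]
  | cons c2 t2 ih =>
    cases l1 with
    | nil => rw [renderSide_nil_other, diffs_nil_left]
    | cons c1 t1 =>
      rw [renderSide_cons_cons, ih]
      by_cases h : c1 = c2
      · subst h; simp [pvDiffs, join_cons]
      · have h1 : (c1 == c2) = false := by simp [h]
        simp [pvDiffs, h1, join_cons]

-- ===== VERDICT (by name: the statement is the Claim_ definition above) =====
theorem char_diff_spec : Claim_equal_char_diff := by
  intro line1 line2 _
  unfold Spec_char_diff char_diff char_diff_alt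
  dsimp only
  rw [loopA, renderSide_red, renderSide_green]
  simp
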